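-- pv_equiv track=rewrite | github.com/sritarung/intro-python | midterm.py | twod
-- ===== SOURCE A (Python) =====
-- def twod(i):
--     d=0
--     two=[]
--     a=[]
--     for j in range(int(len(i)/2)):
--         for k in range(2):
--             a.append(i[d])
--             d=d+1
--         two.append(a)
--         a=[]
--     return two
-- ===== SOURCE B (Python) =====
-- def twod(i):
--     # Consume the list two elements at a time via one shared iterator:
--     # zip(it, it) yields consecutive pairs and truncates a trailing odd element.
--     it = iter(i)
--     return [[a, b] for a, b in zip(it, it)]
-- ===== Notes on version B (the rewrite author's own statement) =====
-- stated objective: idiomatic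
-- what changed: B replaces A's running index d with an inner 2-step loop by the standard zip(it, it) single-iterator idiom that yields consecutive pairs directly (ported as structural recursion taking two elements at a time).
import Mathlib
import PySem

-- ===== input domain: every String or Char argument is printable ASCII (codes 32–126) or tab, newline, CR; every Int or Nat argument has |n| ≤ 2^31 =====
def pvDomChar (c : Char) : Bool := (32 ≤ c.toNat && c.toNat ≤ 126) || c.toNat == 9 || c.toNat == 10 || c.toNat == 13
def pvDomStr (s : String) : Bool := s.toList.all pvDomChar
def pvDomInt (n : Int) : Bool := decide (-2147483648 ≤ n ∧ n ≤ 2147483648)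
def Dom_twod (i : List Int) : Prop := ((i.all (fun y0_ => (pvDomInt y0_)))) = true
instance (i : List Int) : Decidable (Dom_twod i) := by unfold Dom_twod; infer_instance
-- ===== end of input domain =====

-- B replaces A's running index d with the zip(it, it) single-iterator idiom
-- that yields consecutive pairs directly (idiomatic; same O(n) cost).

-- ===== PORT A =====
-- inner 'for k in range(2): a.append(i[d]); d = d + 1'
-- (i[d] is always in range here: d < 2*(len(i)//2) ≤ len(i), so the .getD default is dead)
def twodInner (i : List Int) (k : Nat) (d : Int) (a : List Int) : List Int × Int :=
  match k with
  | 0 => (a, d)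
  | k + 1 => twodInner i k (d + 1) (a ++ [(PySem.List.pyGet? i d).getD 0])

-- outer 'for j in range(int(len(i)/2)): … two.append(a); a = []'
def twodOuter (i : List Int) (j : Nat) (d : Int) (two : List (List Int)) : List (List Int) :=
  match j with
  | 0 => two
  | j + 1 =>
    let p := twodInner i 2 d []
    twodOuter i j p.2 (two ++ [p.1])

def twod (i : List Int) : List (List Int) :=
  twodOuter i (i.length / 2) 0 []

-- ===== PORT B =====
-- zip(it, it) over one shared iterator = take consecutive pairs, truncating an odd tail
def twod_alt (i : List Int) : List (List Int) :=
  match i with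
  | a :: b :: t => [a, b] :: twod_alt t
  | _ => []

-- ===== PRECONDITION & SPEC =====
def Spec_twod (i : List Int) (out : List (List Int)) : Prop := out = twod_alt i
instance (i : List Int) (out : List (List Int)) : Decidable (Spec_twod i out) := by unfold Spec_twod; infer_instance

-- ===== CLAIM (what is proved, stated in full; the proofs are below) =====
def Claim_equal_twod : Prop := ∀ (i : List Int), Dom_twod i → Spec_twod i (twod i)

-- ===== LEMMAS AND PROOFS =====

lemma twodOuter_eq (n : Nat) : ∀ (pre t : List Int) (two : List (List Int)),
    n = t.length / 2 →
    twodOuter (pre ++ t) n (pre.length : Int) two = two ++ twod_alt t := by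
  induction n with
  | zero =>
    intro pre t two h
    match t with
    | [] => simp [twodOuter, twod_alt]
    | [a] => simp [twodOuter, twod_alt]
    | a :: b :: t => simp at h; omega
  | succ n ih =>
    intro pre t two h
    match t with
    | [] => simp at h
    | [a] => simp at h
    | a :: b :: t =>
      have h2 : n = t.length / 2 := by
        simp at h; omega
      have g1 : PySem.List.pyGet? (pre ++ a :: b :: t) (pre.length : Int) = some a :=
        PySem.List.pyGet?_append_length pre (b :: t) a
      have g2 : PySem.List.pyGet? (pre ++ a :: b :: t) ((pre.length : Int) + 1) = some b := by
        have := PySem.List.pyGet?_append_right (pre := pre) (ys := a :: b :: t) (k := 1)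
        simpa using this
      have step : twodOuter (pre ++ a :: b :: t) (n + 1) (pre.length : Int) two
          = twodOuter ((pre ++ [a, b]) ++ t) n ((pre ++ [a, b]).length : Int)
              (two ++ [[a, b]]) := by
        simp [twodOuter, twodInner, g1, g2]
        ring_nf
      rw [step, ih (pre ++ [a, b]) t (two ++ [[a, b]]) h2]
      simp [twod_alt]

-- ===== VERDICT (by name: the statement is the Claim_ definition above) =====
theorem twod_spec : Claim_equal_twod := by
  intro i _
  unfold Spec_twod twod
  have := twodOuter_eq (i.length / 2) [] i [] rfl
  simpa using this
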